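-- pv_equiv track=rewrite | github.com/ColorIan41/DRM_LAB3 | main.py | set_dir_product
-- ===== SOURCE A (Python) =====
-- def set_dir_product(a, b):
--     dir_pr = set()
--     for item in a:
--         for item1 in b:
--             pair = (item, item1)
--             dir_pr.add(pair)
--     dir_pr_copy = dir_pr.copy()
--     for pair in dir_pr:
--         stored_pair = pair
--         for pair1 in dir_pr:
--             if stored_pair == pair1[::-1]:
--                 dir_pr_copy.remove(pair1)
--             else:
--                 continue
--     return dir_pr_copy
-- ===== SOURCE B (Python) =====
-- def set_dir_product(a, b):
--     sa, sb = set(a), set(b)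
--     inter = sa & sb
--     full = {(x, y) for x in sa for y in sb}
--     excl = {(x, y) for x in inter for y in inter}
--     return full - excl
-- ===== Notes on version B (the rewrite author's own statement) =====
-- stated objective: faster
-- what changed: Instead of scanning all pairs against all pairs to delete those whose reverse is present, B computes the intersection a&b and subtracts the block (a&b)x(a&b) from the full product, using the identity that a pair's reverse exists iff both coordinates lie in the intersection.
import Mathlib
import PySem

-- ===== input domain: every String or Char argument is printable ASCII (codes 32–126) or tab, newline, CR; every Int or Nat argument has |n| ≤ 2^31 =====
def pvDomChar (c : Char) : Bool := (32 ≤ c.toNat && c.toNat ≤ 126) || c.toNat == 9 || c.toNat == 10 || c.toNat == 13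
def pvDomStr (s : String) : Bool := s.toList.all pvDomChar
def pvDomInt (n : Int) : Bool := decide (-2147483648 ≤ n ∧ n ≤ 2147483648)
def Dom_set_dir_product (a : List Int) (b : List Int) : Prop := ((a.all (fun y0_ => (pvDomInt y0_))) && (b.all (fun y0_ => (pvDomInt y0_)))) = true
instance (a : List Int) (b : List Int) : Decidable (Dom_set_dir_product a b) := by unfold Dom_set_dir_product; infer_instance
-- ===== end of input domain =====

-- B replaces A's all-pairs reverse scan by intersection plus a set difference of two products (faster in a timing run).

-- ===== PORT A =====
-- pair[::-1] on a 2-tuple is (pair.2, pair.1).  Python's set.remove is ported as Set.discard: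
-- it can never raise KeyError here, since each pair1 is removed at most once (only by the
-- unique outer pair equal to its reverse), so discard coincides with remove on every input.
def set_dir_product (a : List Int) (b : List Int) : List (Int × Int) :=
  let dir_pr : PySem.Set (Int × Int) :=
    a.foldl (fun s item => b.foldl (fun s item1 => PySem.Set.add s (item, item1)) s) PySem.Set.empty
  let dir_pr_copy := dir_pr
  dir_pr.foldl (fun c pair =>
    dir_pr.foldl (fun c pair1 =>
      if pair = (pair1.2, pair1.1) then PySem.Set.discard c pair1 else c) c) dir_pr_copy

-- ===== PORT B =====
def set_dir_product_alt (a : List Int) (b : List Int) : List (Int × Int) :=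
  let sa : PySem.Set Int := PySem.Set.ofList a
  let sb : PySem.Set Int := PySem.Set.ofList b
  let inter : PySem.Set Int := PySem.Set.inter sa sb
  let full : PySem.Set (Int × Int) :=
    sa.foldl (fun s x => sb.foldl (fun s y => PySem.Set.add s (x, y)) s) PySem.Set.empty
  let excl : PySem.Set (Int × Int) :=
    inter.foldl (fun s x => inter.foldl (fun s y => PySem.Set.add s (x, y)) s) PySem.Set.empty
  PySem.Set.diff full excl

-- ===== PRECONDITION & SPEC =====
def Spec_set_dir_product (a : List Int) (b : List Int) (out : List (Int × Int)) : Prop := out = set_dir_product_alt a b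
instance (a : List Int) (b : List Int) (out : List (Int × Int)) : Decidable (Spec_set_dir_product a b out) := by unfold Spec_set_dir_product; infer_instance

-- ===== CLAIM (what is proved, stated in full; the proofs are below) =====
def Claim_equal_set_dir_product : Prop := ∀ (a : List Int) (b : List Int), Dom_set_dir_product a b → Spec_set_dir_product a b (set_dir_product a b)

-- ===== LEMMAS AND PROOFS =====

-- the shared double-loop shape: add every pair of xs × ys to s
def pairsF (xs ys : List Int) (s : PySem.Set (Int × Int)) : PySem.Set (Int × Int) :=
  xs.foldl (fun s x => ys.foldl (fun s y => PySem.Set.add s (x, y)) s) s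

lemma mem_inner (x : Int) (ys : List Int) (s : PySem.Set (Int × Int)) (p : Int × Int) :
    p ∈ ys.foldl (fun s y => PySem.Set.add s (x, y)) s ↔ p ∈ s ∨ (p.1 = x ∧ p.2 ∈ ys) := by
  rw [PySem.Set.mem_foldl_add]
  constructor
  · rintro (h | ⟨y, hy, rfl⟩)
    · exact Or.inl h
    · exact Or.inr ⟨rfl, hy⟩
  · rintro (h | ⟨h1, h2⟩)
    · exact Or.inl h
    · exact Or.inr ⟨p.2, h2, by rw [← h1]⟩

lemma mem_pairsF (xs ys : List Int) (s : PySem.Set (Int × Int)) (p : Int × Int) :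
    p ∈ pairsF xs ys s ↔ p ∈ s ∨ (p.1 ∈ xs ∧ p.2 ∈ ys) := by
  induction xs generalizing s with
  | nil => simp [pairsF]
  | cons x xs ih =>
    simp only [pairsF, List.foldl_cons] at *
    rw [ih, mem_inner]
    simp only [List.mem_cons]
    tauto

lemma inner_of_all_mem (x : Int) (ys : List Int) (s : PySem.Set (Int × Int))
    (h : ∀ y ∈ ys, (x, y) ∈ s) : ys.foldl (fun s y => PySem.Set.add s (x, y)) s = s := by
  induction ys generalizing s with
  | nil => rfl
  | cons y ys ih =>
    simp only [List.foldl_cons]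
    rw [PySem.Set.add_of_mem (h y (by simp))]
    exact ih s (fun y' hy' => h y' (by simp [hy']))

lemma pairsF_dedup_left (xs ys : List Int) (s : PySem.Set (Int × Int)) :
    pairsF xs ys s = pairsF (PySem.Set.ofList xs) ys s := by
  induction xs using List.reverseRecOn generalizing s with
  | nil => rfl
  | append_singleton xs x ih =>
    rw [PySem.Set.ofList_append_singleton, PySem.Set.add_eq_ite]
    by_cases hx : x ∈ PySem.Set.ofList xs
    · simp only [hx, if_true]
      rw [← ih]
      simp only [pairsF, List.foldl_append, List.foldl_cons, List.foldl_nil]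
      apply inner_of_all_mem
      intro y hy
      rw [show List.foldl (fun s x => List.foldl (fun s y => PySem.Set.add s (x, y)) s ys) s xs
            = pairsF xs ys s from rfl, mem_pairsF]
      exact Or.inr ⟨(PySem.Set.mem_ofList xs x).mp hx, hy⟩
    · simp only [hx, if_false]
      simp only [pairsF, List.foldl_append, List.foldl_cons, List.foldl_nil] at *
      rw [ih]

lemma inner_dedup (x : Int) (ys : List Int) (s : PySem.Set (Int × Int)) :
    ys.foldl (fun s y => PySem.Set.add s (x, y)) s
      = (PySem.Set.ofList ys).foldl (fun s y => PySem.Set.add s (x, y)) s := by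
  induction ys using List.reverseRecOn generalizing s with
  | nil => rfl
  | append_singleton ys y ih =>
    rw [PySem.Set.ofList_append_singleton, PySem.Set.add_eq_ite]
    by_cases hy : y ∈ PySem.Set.ofList ys
    · simp only [hy, if_true]
      rw [List.foldl_append, ih]
      simp only [List.foldl_cons, List.foldl_nil]
      apply PySem.Set.add_of_mem
      rw [PySem.Set.mem_foldl_add]
      exact Or.inr ⟨y, hy, rfl⟩
    · simp only [hy, if_false]
      rw [List.foldl_append, List.foldl_append, ih]

lemma pairsF_dedup_right (xs ys : List Int) (s : PySem.Set (Int × Int)) :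
    pairsF xs ys s = pairsF xs (PySem.Set.ofList ys) s := by
  induction xs generalizing s with
  | nil => rfl
  | cons x xs ih =>
    simp only [pairsF, List.foldl_cons] at *
    rw [inner_dedup, ih]

-- A's inner removal loop is a filter of the accumulator
lemma inner_discard (p : Int × Int) (L : List (Int × Int)) (c : List (Int × Int)) :
    L.foldl (fun c q => if p = (q.2, q.1) then PySem.Set.discard c q else c) c
      = c.filter (fun y => !(decide (p = (y.2, y.1)) && L.contains y)) := by
  induction L generalizing c with
  | nil => simp
  | cons q L ih =>
    simp only [List.foldl_cons]
    by_cases hq : p = (q.2, q.1)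
    · rw [if_pos hq, ih, PySem.Set.discard, List.filter_filter]
      apply List.filter_congr
      intro y _
      by_cases hyq : y = q
      · subst hyq
        simp [hq]
      · have h1 : (y == q) = false := beq_eq_false_iff_ne.mpr hyq
        have h2 : (q == y) = false := beq_eq_false_iff_ne.mpr (Ne.symm hyq)
        simp [h1, hyq]
    · rw [if_neg hq, ih]
      apply List.filter_congr
      intro y _
      by_cases hyq : y = q
      · subst hyq
        simp [hq]
      · have h1 : (y == q) = false := beq_eq_false_iff_ne.mpr hyq
        have h2 : (q == y) = false := beq_eq_false_iff_ne.mpr (Ne.symm hyq)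
        simp [hyq]

-- composing filters over an outer fold
lemma foldl_filter {α β : Type} (L : List β) (Q : β → α → Bool) (c : List α) :
    L.foldl (fun c p => c.filter (Q p)) c = c.filter (fun y => L.all (fun p => Q p y)) := by
  induction L generalizing c with
  | nil => simp
  | cons p L ih =>
    simp only [List.foldl_cons]
    rw [ih, List.filter_filter]
    apply List.filter_congr
    intro y _
    simp [Bool.and_comm]

lemma phase2_eq_filter (dir : List (Int × Int)) :
    dir.foldl (fun c pair =>
        dir.foldl (fun c pair1 =>
          if pair = (pair1.2, pair1.1) then PySem.Set.discard c pair1 else c) c) dir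
      = dir.filter (fun y => !(decide ((y.2, y.1) ∈ dir))) := by
  have h1 : dir.foldl (fun c pair =>
      dir.foldl (fun c pair1 =>
        if pair = (pair1.2, pair1.1) then PySem.Set.discard c pair1 else c) c) dir
    = dir.foldl (fun c pair =>
        c.filter (fun y => !(decide (pair = (y.2, y.1)) && dir.contains y))) dir := by
    apply PySem.List.foldl_congr_mem
    intro c pair _
    exact inner_discard pair dir c
  rw [h1, foldl_filter]
  apply List.filter_congr
  intro y hy
  have hcy : dir.contains y = true := by simpa using hy
  simp only [hcy, Bool.and_true]
  by_cases hrev : (y.2, y.1) ∈ dir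
  · simp only [hrev, decide_true, Bool.not_true]
    apply eq_false_of_ne_true
    intro hall
    rw [List.all_eq_true] at hall
    have := hall (y.2, y.1) hrev
    simp at this
  · simp only [hrev, decide_false, Bool.not_false]
    rw [List.all_eq_true]
    intro q hq
    have : ¬ q = (y.2, y.1) := fun h => hrev (h ▸ hq)
    simp [this]

-- ===== VERDICT (by name: the statement is the Claim_ definition above) =====
theorem set_dir_product_spec : Claim_equal_set_dir_product := by
  intro a b _
  unfold Spec_set_dir_product set_dir_product set_dir_product_alt
  simp only []
  rw [show ∀ s, a.foldl (fun s item => b.foldl (fun s item1 => PySem.Set.add s (item, item1)) s) s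
        = pairsF a b s from fun _ => rfl]
  rw [show ∀ s, (PySem.Set.ofList a).foldl
        (fun s x => (PySem.Set.ofList b).foldl (fun s y => PySem.Set.add s (x, y)) s) s
        = pairsF (PySem.Set.ofList a) (PySem.Set.ofList b) s from fun _ => rfl]
  rw [show ∀ s, (PySem.Set.inter (PySem.Set.ofList a) (PySem.Set.ofList b)).foldl
        (fun s x => (PySem.Set.inter (PySem.Set.ofList a) (PySem.Set.ofList b)).foldl
          (fun s y => PySem.Set.add s (x, y)) s) s
        = pairsF (PySem.Set.inter (PySem.Set.ofList a) (PySem.Set.ofList b))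
                 (PySem.Set.inter (PySem.Set.ofList a) (PySem.Set.ofList b)) s from fun _ => rfl]
  rw [phase2_eq_filter]
  have hfull : pairsF a b PySem.Set.empty
      = pairsF (PySem.Set.ofList a) (PySem.Set.ofList b) PySem.Set.empty := by
    rw [pairsF_dedup_left, pairsF_dedup_right]
  rw [← hfull, PySem.Set.diff]
  apply List.filter_congr
  intro y hy
  have hmem := (mem_pairsF a b PySem.Set.empty y).mp hy
  simp only [PySem.Set.empty, List.not_mem_nil, false_or] at hmem
  obtain ⟨hy1, hy2⟩ := hmem
  congr 1
  rw [Bool.eq_iff_iff, decide_eq_true_iff]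
  have hco : ∀ z : Int × Int,
      (pairsF (PySem.Set.inter (PySem.Set.ofList a) (PySem.Set.ofList b))
        (PySem.Set.inter (PySem.Set.ofList a) (PySem.Set.ofList b)) PySem.Set.empty).contains z
      = true ↔ (z.1 ∈ a ∧ z.1 ∈ b) ∧ (z.2 ∈ a ∧ z.2 ∈ b) := by
    intro z
    rw [PySem.Set.contains_iff, mem_pairsF]
    simp [PySem.Set.empty, PySem.Set.mem_inter, PySem.Set.mem_ofList]
  constructor
  · intro hrev
    have := (mem_pairsF a b PySem.Set.empty (y.2, y.1)).mp hrev
    simp only [PySem.Set.empty, List.not_mem_nil, false_or] at this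
    exact (hco y).mpr ⟨⟨hy1, this.2⟩, ⟨this.1, hy2⟩⟩
  · intro hc
    have := (hco y).mp hc
    rw [mem_pairsF]
    exact Or.inr ⟨this.2.1, this.1.2⟩
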